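-- pv_equiv track=rewrite | github.com/icedmoca/MeRNSTA | storage/belief_consolidation.py | _predicates_are_contradictory
-- ===== SOURCE A (Python) =====
-- def _predicates_are_contradictory(pred1: str, pred2: str) -> bool:
--     """Check if two predicates are contradictory."""
--     contradictory_pairs = [
--         ('like', 'hate'), ('like', 'dislike'),
--         ('love', 'hate'), ('love', 'dislike'),
--         ('enjoy', 'hate'), ('enjoy', 'dislike'),
--         ('prefer', 'dislike'), ('want', 'reject')
--     ]
--
--     pred1_clean = pred1.lower().strip()
--     pred2_clean = pred2.lower().strip()
--
--     for pair in contradictory_pairs: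
--         if (pred1_clean in pair and pred2_clean in pair and pred1_clean != pred2_clean):
--             return True
--
--     return False
-- ===== SOURCE B (Python) =====
-- _POSITIVE = {'like', 'love', 'enjoy'}
-- _NEGATIVE = {'hate', 'dislike'}
--
-- def _predicates_are_contradictory(pred1: str, pred2: str) -> bool:
--     """Check if two predicates are contradictory (sentiment-class set algebra)."""
--     ab = {pred1.lower().strip(), pred2.lower().strip()}
--     # a positive-sentiment word against a negative-sentiment word always contradicts
--     if ab & _POSITIVE and ab & _NEGATIVE:
--         return True
--     # the two remaining special antonym pairs, order-insensitive
--     return ab == {'prefer', 'dislike'} or ab == {'want', 'reject'}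
-- ===== Notes on version B (the rewrite author's own statement) =====
-- stated objective: alternative
-- what changed: Replaced A's ordered scan over the 8 (word,word) pairs (two tuple-membership tests and an inequality per pair) by set algebra on the unordered pair {pred1_clean, pred2_clean}: a contradiction is either a nonempty intersection with both the positive class {like,love,enjoy} and the negative class {hate,dislike}, or equality as a set with one of the two special pairs {prefer,dislike} / {want,reject}.
import Mathlib
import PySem

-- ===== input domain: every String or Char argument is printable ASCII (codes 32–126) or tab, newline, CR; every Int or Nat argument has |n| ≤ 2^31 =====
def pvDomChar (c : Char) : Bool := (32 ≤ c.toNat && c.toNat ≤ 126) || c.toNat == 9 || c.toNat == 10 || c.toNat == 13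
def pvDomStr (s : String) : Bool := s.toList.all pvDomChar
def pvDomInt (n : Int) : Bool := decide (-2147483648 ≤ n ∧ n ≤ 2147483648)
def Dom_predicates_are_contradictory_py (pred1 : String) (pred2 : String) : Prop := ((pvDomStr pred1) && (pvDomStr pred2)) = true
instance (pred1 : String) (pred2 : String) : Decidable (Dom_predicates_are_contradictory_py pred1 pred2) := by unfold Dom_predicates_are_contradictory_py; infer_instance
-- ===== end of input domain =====

-- B replaces A's ordered scan over an explicit pair list by sentiment-class set
-- algebra on the unordered pair {pred1, pred2}: positive-class ∩ negative-class
-- intersection tests plus two order-insensitive set equalities (alternative).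

-- ===== PORT A =====
def pvPairsA : List (String × String) :=
  [("like", "hate"), ("like", "dislike"),
   ("love", "hate"), ("love", "dislike"),
   ("enjoy", "hate"), ("enjoy", "dislike"),
   ("prefer", "dislike"), ("want", "reject")]

def predicates_are_contradictory_py (pred1 : String) (pred2 : String) : Bool :=
  let pred1_clean := PySem.Str.strip (PySem.Str.lower pred1)
  let pred2_clean := PySem.Str.strip (PySem.Str.lower pred2)
  -- for-loop with early 'return True' = List.any over the pairs; 'x in pair' on a 2-tuple = equality with either component
  pvPairsA.any (fun pair =>
    (pred1_clean == pair.1 || pred1_clean == pair.2) &&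
    (pred2_clean == pair.1 || pred2_clean == pair.2) &&
    pred1_clean != pred2_clean)

-- ===== PORT B =====
def pvPositive : PySem.Set String := PySem.Set.ofList ["like", "love", "enjoy"]
def pvNegative : PySem.Set String := PySem.Set.ofList ["hate", "dislike"]

def predicates_are_contradictory_py_alt (pred1 : String) (pred2 : String) : Bool :=
  -- ab = {pred1.lower().strip(), pred2.lower().strip()}; Python set truthiness = non-emptiness
  let ab : PySem.Set String :=
    PySem.Set.ofList [PySem.Str.strip (PySem.Str.lower pred1),
                      PySem.Str.strip (PySem.Str.lower pred2)]
  if !(PySem.Set.inter ab pvPositive).isEmpty && !(PySem.Set.inter ab pvNegative).isEmpty then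
    true
  else
    PySem.Set.equal ab (PySem.Set.ofList ["prefer", "dislike"]) ||
    PySem.Set.equal ab (PySem.Set.ofList ["want", "reject"])

-- ===== PRECONDITION & SPEC =====
def Spec_predicates_are_contradictory_py (pred1 : String) (pred2 : String) (out : Bool) : Prop := out = predicates_are_contradictory_py_alt pred1 pred2
instance (pred1 : String) (pred2 : String) (out : Bool) : Decidable (Spec_predicates_are_contradictory_py pred1 pred2 out) := by unfold Spec_predicates_are_contradictory_py; infer_instance

-- ===== CLAIM (what is proved, stated in full; the proofs are below) =====
def Claim_equal_predicates_are_contradictory_py : Prop := ∀ (pred1 : String) (pred2 : String), Dom_predicates_are_contradictory_py pred1 pred2 → Spec_predicates_are_contradictory_py pred1 pred2 (predicates_are_contradictory_py pred1 pred2)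

-- ===== LEMMAS AND PROOFS =====

-- Core fact: for ANY two strings s t (here: the cleaned predicates), A's scan over
-- the ordered pair list agrees with B's sentiment-class set algebra on {s, t}.
theorem pv_core (s t : String) :
    pvPairsA.any (fun pair =>
      (s == pair.1 || s == pair.2) && (t == pair.1 || t == pair.2) && s != t)
    = (let ab : PySem.Set String := PySem.Set.ofList [s, t];
       if !(PySem.Set.inter ab pvPositive).isEmpty && !(PySem.Set.inter ab pvNegative).isEmpty then
         true
       else
         PySem.Set.equal ab (PySem.Set.ofList ["prefer", "dislike"]) ||
         PySem.Set.equal ab (PySem.Set.ofList ["want", "reject"])) := by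
  by_cases hs0 : s = "like"
  · subst hs0
    by_cases ht0 : t = "like"
    · subst ht0; decide
    · 
      by_cases ht1 : t = "love"
      · subst ht1; decide
      · 
        by_cases ht2 : t = "enjoy"
        · subst ht2; decide
        · 
          by_cases ht3 : t = "hate"
          · subst ht3; decide
          · 
            by_cases ht4 : t = "dislike"
            · subst ht4; decide
            · 
              by_cases ht5 : t = "prefer"
              · subst ht5; decide
              · 
                by_cases ht6 : t = "want"
                · subst ht6; decide
                · 
                  by_cases ht7 : t = "reject"
                  · subst ht7; decide
                  · 
                    simp [pvPairsA, pvPositive, pvNegative, PySem.Set.ofList, PySem.Set.add, PySem.Set.inter, PySem.Set.equal, PySem.Set.issubset, List.any, List.isEmpty, List.filter, bne, beq_iff_eq, ht0, Ne.symm ht0, ht1, Ne.symm ht1, ht2, Ne.symm ht2, ht3, Ne.symm ht3, ht4, Ne.symm ht4, ht5, Ne.symm ht5, ht6, Ne.symm ht6, ht7, Ne.symm ht7]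
  · 
    by_cases hs1 : s = "love"
    · subst hs1
      by_cases ht0 : t = "like"
      · subst ht0; decide
      · 
        by_cases ht1 : t = "love"
        · subst ht1; decide
        · 
          by_cases ht2 : t = "enjoy"
          · subst ht2; decide
          · 
            by_cases ht3 : t = "hate"
            · subst ht3; decide
            · 
              by_cases ht4 : t = "dislike"
              · subst ht4; decide
              · 
                by_cases ht5 : t = "prefer"
                · subst ht5; decide
                · 
                  by_cases ht6 : t = "want"
                  · subst ht6; decide
                  · 
                    by_cases ht7 : t = "reject"
                    · subst ht7; decide
                    · 
                      simp [pvPairsA, pvPositive, pvNegative, PySem.Set.ofList, PySem.Set.add, PySem.Set.inter, PySem.Set.equal, PySem.Set.issubset, List.any, List.isEmpty, List.filter, bne, beq_iff_eq, ht0, Ne.symm ht0, ht1, Ne.symm ht1, ht2, Ne.symm ht2, ht3, Ne.symm ht3, ht4, Ne.symm ht4, ht5, Ne.symm ht5, ht6, Ne.symm ht6, ht7, Ne.symm ht7]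
    · 
      by_cases hs2 : s = "enjoy"
      · subst hs2
        by_cases ht0 : t = "like"
        · subst ht0; decide
        · 
          by_cases ht1 : t = "love"
          · subst ht1; decide
          · 
            by_cases ht2 : t = "enjoy"
            · subst ht2; decide
            · 
              by_cases ht3 : t = "hate"
              · subst ht3; decide
              · 
                by_cases ht4 : t = "dislike"
                · subst ht4; decide
                · 
                  by_cases ht5 : t = "prefer"
                  · subst ht5; decide
                  · 
                    by_cases ht6 : t = "want"
                    · subst ht6; decide
                    · 
                      by_cases ht7 : t = "reject"
                      · subst ht7; decide
                      · 
                        simp [pvPairsA, pvPositive, pvNegative, PySem.Set.ofList, PySem.Set.add, PySem.Set.inter, PySem.Set.equal, PySem.Set.issubset, List.any, List.isEmpty, List.filter, bne, beq_iff_eq, ht0, Ne.symm ht0, ht1, Ne.symm ht1, ht2, Ne.symm ht2, ht3, Ne.symm ht3, ht4, Ne.symm ht4, ht5, Ne.symm ht5, ht6, Ne.symm ht6, ht7, Ne.symm ht7]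
      · 
        by_cases hs3 : s = "hate"
        · subst hs3
          by_cases ht0 : t = "like"
          · subst ht0; decide
          · 
            by_cases ht1 : t = "love"
            · subst ht1; decide
            · 
              by_cases ht2 : t = "enjoy"
              · subst ht2; decide
              · 
                by_cases ht3 : t = "hate"
                · subst ht3; decide
                · 
                  by_cases ht4 : t = "dislike"
                  · subst ht4; decide
                  · 
                    by_cases ht5 : t = "prefer"
                    · subst ht5; decide
                    · 
                      by_cases ht6 : t = "want"
                      · subst ht6; decide
                      · 
                        by_cases ht7 : t = "reject"
                        · subst ht7; decide
                        · 
                          simp [pvPairsA, pvPositive, pvNegative, PySem.Set.ofList, PySem.Set.add, PySem.Set.inter, PySem.Set.equal, PySem.Set.issubset, List.any, List.isEmpty, List.filter, bne, beq_iff_eq, ht0, Ne.symm ht0, ht1, Ne.symm ht1, ht2, Ne.symm ht2, ht3, Ne.symm ht3, ht4, Ne.symm ht4, ht5, Ne.symm ht5, ht6, Ne.symm ht6, ht7, Ne.symm ht7]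
        · 
          by_cases hs4 : s = "dislike"
          · subst hs4
            by_cases ht0 : t = "like"
            · subst ht0; decide
            · 
              by_cases ht1 : t = "love"
              · subst ht1; decide
              · 
                by_cases ht2 : t = "enjoy"
                · subst ht2; decide
                · 
                  by_cases ht3 : t = "hate"
                  · subst ht3; decide
                  · 
                    by_cases ht4 : t = "dislike"
                    · subst ht4; decide
                    · 
                      by_cases ht5 : t = "prefer"
                      · subst ht5; decide
                      · 
                        by_cases ht6 : t = "want"
                        · subst ht6; decide
                        · 
                          by_cases ht7 : t = "reject"
                          · subst ht7; decide
                          · 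
                            simp [pvPairsA, pvPositive, pvNegative, PySem.Set.ofList, PySem.Set.add, PySem.Set.inter, PySem.Set.equal, PySem.Set.issubset, List.any, List.isEmpty, List.filter, bne, beq_iff_eq, ht0, Ne.symm ht0, ht1, Ne.symm ht1, ht2, Ne.symm ht2, ht3, Ne.symm ht3, ht4, Ne.symm ht4, ht5, Ne.symm ht5, ht6, Ne.symm ht6, ht7, Ne.symm ht7]
          · 
            by_cases hs5 : s = "prefer"
            · subst hs5
              by_cases ht0 : t = "like"
              · subst ht0; decide
              · 
                by_cases ht1 : t = "love"
                · subst ht1; decide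
                · 
                  by_cases ht2 : t = "enjoy"
                  · subst ht2; decide
                  · 
                    by_cases ht3 : t = "hate"
                    · subst ht3; decide
                    · 
                      by_cases ht4 : t = "dislike"
                      · subst ht4; decide
                      · 
                        by_cases ht5 : t = "prefer"
                        · subst ht5; decide
                        · 
                          by_cases ht6 : t = "want"
                          · subst ht6; decide
                          · 
                            by_cases ht7 : t = "reject"
                            · subst ht7; decide
                            · 
                              simp [pvPairsA, pvPositive, pvNegative, PySem.Set.ofList, PySem.Set.add, PySem.Set.inter, PySem.Set.equal, PySem.Set.issubset, List.any, List.isEmpty, List.filter, bne, beq_iff_eq, ht0, Ne.symm ht0, ht1, Ne.symm ht1, ht2, Ne.symm ht2, ht3, Ne.symm ht3, ht4, Ne.symm ht4, ht5, Ne.symm ht5, ht6, Ne.symm ht6, ht7, Ne.symm ht7]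
            · 
              by_cases hs6 : s = "want"
              · subst hs6
                by_cases ht0 : t = "like"
                · subst ht0; decide
                · 
                  by_cases ht1 : t = "love"
                  · subst ht1; decide
                  · 
                    by_cases ht2 : t = "enjoy"
                    · subst ht2; decide
                    · 
                      by_cases ht3 : t = "hate"
                      · subst ht3; decide
                      · 
                        by_cases ht4 : t = "dislike"
                        · subst ht4; decide
                        · 
                          by_cases ht5 : t = "prefer"
                          · subst ht5; decide
                          · 
                            by_cases ht6 : t = "want"
                            · subst ht6; decide
                            · 
                              by_cases ht7 : t = "reject"
                              · subst ht7; decide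
                              · 
                                simp [pvPairsA, pvPositive, pvNegative, PySem.Set.ofList, PySem.Set.add, PySem.Set.inter, PySem.Set.equal, PySem.Set.issubset, List.any, List.isEmpty, List.filter, bne, beq_iff_eq, ht0, Ne.symm ht0, ht1, Ne.symm ht1, ht2, Ne.symm ht2, ht3, Ne.symm ht3, ht4, Ne.symm ht4, ht5, Ne.symm ht5, ht6, Ne.symm ht6, ht7, Ne.symm ht7]
              · 
                by_cases hs7 : s = "reject"
                · subst hs7
                  by_cases ht0 : t = "like"
                  · subst ht0; decide
                  · 
                    by_cases ht1 : t = "love"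
                    · subst ht1; decide
                    · 
                      by_cases ht2 : t = "enjoy"
                      · subst ht2; decide
                      · 
                        by_cases ht3 : t = "hate"
                        · subst ht3; decide
                        · 
                          by_cases ht4 : t = "dislike"
                          · subst ht4; decide
                          · 
                            by_cases ht5 : t = "prefer"
                            · subst ht5; decide
                            · 
                              by_cases ht6 : t = "want"
                              · subst ht6; decide
                              · 
                                by_cases ht7 : t = "reject"
                                · subst ht7; decide
                                · 
                                  simp [pvPairsA, pvPositive, pvNegative, PySem.Set.ofList, PySem.Set.add, PySem.Set.inter, PySem.Set.equal, PySem.Set.issubset, List.any, List.isEmpty, List.filter, bne, beq_iff_eq, ht0, Ne.symm ht0, ht1, Ne.symm ht1, ht2, Ne.symm ht2, ht3, Ne.symm ht3, ht4, Ne.symm ht4, ht5, Ne.symm ht5, ht6, Ne.symm ht6, ht7, Ne.symm ht7]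
                · 
                  by_cases ht0 : t = "like"
                  · subst ht0
                    simp [pvPairsA, pvPositive, pvNegative, PySem.Set.ofList, PySem.Set.add, PySem.Set.inter, PySem.Set.equal, PySem.Set.issubset, List.any, List.isEmpty, List.filter, bne, beq_iff_eq, hs0, Ne.symm hs0, hs1, Ne.symm hs1, hs2, Ne.symm hs2, hs3, Ne.symm hs3, hs4, Ne.symm hs4, hs5, Ne.symm hs5, hs6, Ne.symm hs6, hs7, Ne.symm hs7]
                  · 
                    by_cases ht1 : t = "love"
                    · subst ht1
                      simp [pvPairsA, pvPositive, pvNegative, PySem.Set.ofList, PySem.Set.add, PySem.Set.inter, PySem.Set.equal, PySem.Set.issubset, List.any, List.isEmpty, List.filter, bne, beq_iff_eq, hs0, Ne.symm hs0, hs1, Ne.symm hs1, hs2, Ne.symm hs2, hs3, Ne.symm hs3, hs4, Ne.symm hs4, hs5, Ne.symm hs5, hs6, Ne.symm hs6, hs7, Ne.symm hs7]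
                    · 
                      by_cases ht2 : t = "enjoy"
                      · subst ht2
                        simp [pvPairsA, pvPositive, pvNegative, PySem.Set.ofList, PySem.Set.add, PySem.Set.inter, PySem.Set.equal, PySem.Set.issubset, List.any, List.isEmpty, List.filter, bne, beq_iff_eq, hs0, Ne.symm hs0, hs1, Ne.symm hs1, hs2, Ne.symm hs2, hs3, Ne.symm hs3, hs4, Ne.symm hs4, hs5, Ne.symm hs5, hs6, Ne.symm hs6, hs7, Ne.symm hs7]
                      · 
                        by_cases ht3 : t = "hate"
                        · subst ht3
                          simp [pvPairsA, pvPositive, pvNegative, PySem.Set.ofList, PySem.Set.add, PySem.Set.inter, PySem.Set.equal, PySem.Set.issubset, List.any, List.isEmpty, List.filter, bne, beq_iff_eq, hs0, Ne.symm hs0, hs1, Ne.symm hs1, hs2, Ne.symm hs2, hs3, Ne.symm hs3, hs4, Ne.symm hs4, hs5, Ne.symm hs5, hs6, Ne.symm hs6, hs7, Ne.symm hs7]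
                        · 
                          by_cases ht4 : t = "dislike"
                          · subst ht4
                            simp [pvPairsA, pvPositive, pvNegative, PySem.Set.ofList, PySem.Set.add, PySem.Set.inter, PySem.Set.equal, PySem.Set.issubset, List.any, List.isEmpty, List.filter, bne, beq_iff_eq, hs0, Ne.symm hs0, hs1, Ne.symm hs1, hs2, Ne.symm hs2, hs3, Ne.symm hs3, hs4, Ne.symm hs4, hs5, Ne.symm hs5, hs6, Ne.symm hs6, hs7, Ne.symm hs7]
                          · 
                            by_cases ht5 : t = "prefer"
                            · subst ht5
                              simp [pvPairsA, pvPositive, pvNegative, PySem.Set.ofList, PySem.Set.add, PySem.Set.inter, PySem.Set.equal, PySem.Set.issubset, List.any, List.isEmpty, List.filter, bne, beq_iff_eq, hs0, Ne.symm hs0, hs1, Ne.symm hs1, hs2, Ne.symm hs2, hs3, Ne.symm hs3, hs4, Ne.symm hs4, hs5, Ne.symm hs5, hs6, Ne.symm hs6, hs7, Ne.symm hs7]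
                            · 
                              by_cases ht6 : t = "want"
                              · subst ht6
                                simp [pvPairsA, pvPositive, pvNegative, PySem.Set.ofList, PySem.Set.add, PySem.Set.inter, PySem.Set.equal, PySem.Set.issubset, List.any, List.isEmpty, List.filter, bne, beq_iff_eq, hs0, Ne.symm hs0, hs1, Ne.symm hs1, hs2, Ne.symm hs2, hs3, Ne.symm hs3, hs4, Ne.symm hs4, hs5, Ne.symm hs5, hs6, Ne.symm hs6, hs7, Ne.symm hs7]
                              · 
                                by_cases ht7 : t = "reject"
                                · subst ht7
                                  simp [pvPairsA, pvPositive, pvNegative, PySem.Set.ofList, PySem.Set.add, PySem.Set.inter, PySem.Set.equal, PySem.Set.issubset, List.any, List.isEmpty, List.filter, bne, beq_iff_eq, hs0, Ne.symm hs0, hs1, Ne.symm hs1, hs2, Ne.symm hs2, hs3, Ne.symm hs3, hs4, Ne.symm hs4, hs5, Ne.symm hs5, hs6, Ne.symm hs6, hs7, Ne.symm hs7]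
                                · 
                                  by_cases hst : t = s
                                  · simp [pvPairsA, pvPositive, pvNegative, PySem.Set.ofList, PySem.Set.add, PySem.Set.inter, PySem.Set.equal, PySem.Set.issubset, List.any, List.isEmpty, List.filter, bne, beq_iff_eq, hst, hs0, Ne.symm hs0, hs1, Ne.symm hs1, hs2, Ne.symm hs2, hs3, Ne.symm hs3, hs4, Ne.symm hs4, hs5, Ne.symm hs5, hs6, Ne.symm hs6, hs7, Ne.symm hs7]
                                  · simp [pvPairsA, pvPositive, pvNegative, PySem.Set.ofList, PySem.Set.add, PySem.Set.inter, PySem.Set.equal, PySem.Set.issubset, List.any, List.isEmpty, List.filter, bne, beq_iff_eq, hst, hs0, Ne.symm hs0, hs1, Ne.symm hs1, hs2, Ne.symm hs2, hs3, Ne.symm hs3, hs4, Ne.symm hs4, hs5, Ne.symm hs5, hs6, Ne.symm hs6, hs7, Ne.symm hs7, ht0, Ne.symm ht0, ht1, Ne.symm ht1, ht2, Ne.symm ht2, ht3, Ne.symm ht3, ht4, Ne.symm ht4, ht5, Ne.symm ht5, ht6, Ne.symm ht6, ht7, Ne.symm ht7]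

-- ===== VERDICT (by name: the statement is the Claim_ definition above) =====
theorem predicates_are_contradictory_py_spec : Claim_equal_predicates_are_contradictory_py := by
  intro pred1 pred2 _
  unfold Spec_predicates_are_contradictory_py predicates_are_contradictory_py predicates_are_contradictory_py_alt
  exact pv_core _ _
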